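-- pv_equiv track=rewrite | github.com/superbeckgit/cypherpuzzle | cypher.py | smash_cyphers
-- ===== SOURCE A (Python) =====
-- def smash_cyphers(cylist):
--     """
--     Combine list of strings by overlapping characters of adjacent list items.
--
--     Parameters
--     ----------
--     cylist - [] - list of cyphers to smash together
--
--     Returns
--     -------
--     cystr - str - one big string of all cyphers overlapping
--
--     Examples
--     --------
--     >>> from cypher import *
--     >>> cylist = ['ABC', 'BCA', 'ACB']
--     >>> 'ABCACB' == smash_cyphers(cylist)
--     True
--
--     """
--     if not cylist:
--         return ''
--
--     cystr = cylist[0]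
--     for cypher in cylist[1:]:
--         overlap = get_overlap(cystr, cypher)
--         cystr = cystr + cypher[overlap:]
--
--     return cystr
--
-- def get_overlap(first, second):
--     """
--     Determine how many character from the beginning of second match the ending characters
--     of first.
--
--     Parameters
--     ----------
--     first - str - a string of characters
--     second - str - another string of characters
--
--     Returns
--     -------
--     overlap - num - number of characters at the end of first also found at the beginning
--                     of second
--
--     Examples
--     --------
--     >>> from cypher import *
--     >>> 3 == get_overlap('ABCD', 'BCDA')
--     True
--     >>> 0 == get_overlap('ABCD', 'EFG')
--     True
--
--     """
--     overlap = 0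
--     for cap in range(len(second), 0, -1):
--         # grab chunks of second cypher in decreasing size
--         subcy = second[:cap]
--         if first.endswith(subcy):
--             overlap = cap
--             break
--     return overlap
-- ===== SOURCE B (Python) =====
-- def smash_cyphers(cylist):
--     """Overlap-merge the strings left to right.
--
--     The longest suffix-of-accumulator = prefix-of-next overlap is found by a
--     single forward pass over the relevant tail of the accumulator, maintaining
--     the set of all active prefix-match lengths (an NFA-style scan), instead of
--     testing every prefix with endswith.
--     """
--     if not cylist:
--         return ''
--     cystr = cylist[0]
--     for cy in cylist[1:]:
--         m = len(cy)
--         tail = cystr[max(0, len(cystr) - m):]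
--         cands = {0}
--         for ch in tail:
--             cands = {k + 1 for k in cands if k < m and cy[k] == ch} | {0}
--         cystr += cy[max(cands):]
--     return cystr
-- ===== Notes on version B (the rewrite author's own statement) =====
-- stated objective: alternative
-- what changed: The overlap of each pair is computed by one forward NFA-style scan over the tail of the accumulator that maintains the set of all active prefix-match lengths, then takes its maximum, instead of testing each prefix of the next string with endswith in decreasing length.
import Mathlib
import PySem

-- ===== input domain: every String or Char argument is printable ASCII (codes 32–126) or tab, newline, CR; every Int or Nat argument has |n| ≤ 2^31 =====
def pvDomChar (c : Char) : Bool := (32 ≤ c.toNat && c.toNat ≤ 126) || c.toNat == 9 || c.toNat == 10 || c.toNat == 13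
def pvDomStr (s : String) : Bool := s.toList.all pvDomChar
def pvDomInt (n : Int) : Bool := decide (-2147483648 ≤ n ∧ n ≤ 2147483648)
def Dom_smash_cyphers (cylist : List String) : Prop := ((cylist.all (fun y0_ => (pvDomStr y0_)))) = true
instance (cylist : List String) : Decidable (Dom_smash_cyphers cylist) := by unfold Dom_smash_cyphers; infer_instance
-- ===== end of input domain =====

-- B replaces A's try-every-prefix-with-endswith overlap search by a single forward scan that
-- maintains the set of all active prefix-match lengths (objective: alternative algorithm, same cost class).

-- ===== PORT A =====
-- get_overlap's 'for cap in range(len(second), 0, -1): … break' as recursion over the range list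
def pv_goA (first second : String) : List Int → Int
  | [] => 0
  | cap :: rest =>
    if PySem.Str.endswith first (PySem.Str.slice second none (some cap)) then cap
    else pv_goA first second rest

def get_overlap (first second : String) : Int :=
  pv_goA first second (PySem.List.pyRange (PySem.Str.len second) 0 (-1))

def smash_cyphers (cylist : List String) : String :=
  match cylist with
  | [] => ""
  | c :: rest =>
    rest.foldl (fun cystr cypher =>
      String.ofList (cystr.toList ++ (PySem.Str.slice cypher (some (get_overlap cystr cypher)) none).toList)) c

-- ===== PORT B =====
-- one step of Source B's inner loop: cands = {k + 1 for k in cands if k < m and cy[k] == ch} | {0}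
def pv_bstep (second : List Char) (m : Int) (cands : PySem.Set Int) (ch : Char) : PySem.Set Int :=
  PySem.Set.union
    (PySem.Set.ofList
      ((cands.filter (fun k => decide (k < m) && (PySem.List.pyGet? second k == some ch))).map (· + 1)))
    (PySem.Set.ofList [0])

-- Source B computes 'max(cands)'; cands is never empty (0 ∈ cands), so max(cands) = max(cands, default=0) = maxD
def pv_overlapB (cystr cypher : String) : Int :=
  let s := cypher.toList
  let m := PySem.Str.len cypher
  let tail := PySem.List.slice cystr.toList (some (max 0 (PySem.Str.len cystr - m))) none
  let cands := tail.foldl (pv_bstep s m) (PySem.Set.ofList [0])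
  PySem.List.maxD cands (fun k => k) 0

def smash_cyphers_alt (cylist : List String) : String :=
  match cylist with
  | [] => ""
  | c :: rest =>
    rest.foldl (fun cystr cypher =>
      String.ofList (cystr.toList ++ (PySem.Str.slice cypher (some (pv_overlapB cystr cypher)) none).toList)) c

-- ===== PRECONDITION & SPEC =====
def Spec_smash_cyphers (cylist : List String) (out : String) : Prop := out = smash_cyphers_alt cylist
instance (cylist : List String) (out : String) : Decidable (Spec_smash_cyphers cylist out) := by unfold Spec_smash_cyphers; infer_instance

-- ===== CLAIM (what is proved, stated in full; the proofs are below) =====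
def Claim_equal_smash_cyphers : Prop := ∀ (cylist : List String), Dom_smash_cyphers cylist → Spec_smash_cyphers cylist (smash_cyphers cylist)

-- ===== LEMMAS AND PROOFS =====

-- the list produced by range(m, 0, -1)
def descList : Nat → List Int
  | 0 => []
  | j+1 => ((j:Int)+1) :: descList j

-- the longest k ≤ j with second.take k a suffix of first (0 always qualifies)
def bestFn (f s : List Char) : Nat → Nat
  | 0 => 0
  | j+1 => if s.take (j+1) <:+ f then j+1 else bestFn f s j

lemma range_map_desc (m : Nat) : (List.range m).map (fun (k:Nat) => (m:Int) - (k:Int)) = descList m := by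
  induction m with
  | zero => rfl
  | succ j ih =>
    rw [List.range_succ_eq_map]
    simp only [List.map_cons, List.map_map, descList, List.cons.injEq]
    refine ⟨by push_cast; ring, ?_⟩
    rw [← ih]
    apply List.map_congr_left
    intro a _
    simp only [Function.comp_apply]
    push_cast; ring

lemma pyRange_desc (m : Nat) : PySem.List.pyRange (m:Int) 0 (-1) = descList m := by
  rw [PySem.List.pyRange]
  norm_num
  rcases Nat.eq_zero_or_pos m with h | h
  · subst h; simp [descList]
  · rw [if_pos h, ← range_map_desc]
    apply List.map_congr_left
    intro a _; ring

lemma endswith_take (first second : String) (k : Nat) :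
    (PySem.Str.endswith first (PySem.Str.slice second none (some (k:Int))) = true)
    ↔ second.toList.take k <:+ first.toList := by
  rw [PySem.Str.endswith_eq]
  simp [pysem, PySem.Chars.endswith_iff]

lemma goA_desc (first second : String) (j : Nat) :
    pv_goA first second (descList j) = ((bestFn first.toList second.toList j : Nat) : Int) := by
  induction j with
  | zero => rfl
  | succ i ih =>
    rw [descList, pv_goA, bestFn]
    by_cases h : second.toList.take (i+1) <:+ first.toList
    · rw [if_pos, if_pos h]
      · push_cast; ring
      · rw [show ((i:Int)+1) = ((i+1 : Nat) : Int) by push_cast; ring]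
        exact (endswith_take first second (i+1)).2 h
    · rw [if_neg, if_neg h, ih]
      rw [show ((i:Int)+1) = ((i+1 : Nat) : Int) by push_cast; ring]
      intro hc
      exact h ((endswith_take first second (i+1)).1 hc)

lemma get_overlap_eq_best (first second : String) :
    get_overlap first second = ((bestFn first.toList second.toList second.toList.length : Nat) : Int) := by
  rw [get_overlap, PySem.Str.len_eq, pyRange_desc, goA_desc]

-- bestFn properties
lemma bestFn_le (f s : List Char) (j : Nat) : bestFn f s j ≤ j := by
  induction j with
  | zero => simp [bestFn]
  | succ i ih => rw [bestFn]; split_ifs <;> omega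

lemma bestFn_suffix (f s : List Char) (j : Nat) : s.take (bestFn f s j) <:+ f := by
  induction j with
  | zero => simp [bestFn]
  | succ i ih =>
    rw [bestFn]; split_ifs with h
    · exact h
    · exact ih

lemma bestFn_max (f s : List Char) (j k : Nat) (hk : k ≤ j) (h : s.take k <:+ f) :
    k ≤ bestFn f s j := by
  induction j with
  | zero => omega
  | succ i ih =>
    rw [bestFn]; split_ifs with hs
    · omega
    · rcases Nat.lt_or_ge k (i+1) with h' | h'
      · exact ih (by omega)
      · exact absurd (by rwa [show k = i+1 by omega] at h) hs

-- membership in the candidate set after scanning p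
def GoodP (s p : List Char) (k : Int) : Prop :=
  ∃ j : Nat, k = (j:Int) ∧ j ≤ s.length ∧ s.take j <:+ p

lemma suffix_concat_iff {α : Type} (u p : List α) (a b : α) :
    (u ++ [a] <:+ p ++ [b]) ↔ (u <:+ p ∧ a = b) := by
  constructor
  · rintro ⟨t, ht⟩
    rw [← List.append_assoc] at ht
    have h2 : (t ++ u).concat a = p.concat b := by simp [List.concat_eq_append, ht]
    rw [List.concat_inj] at h2
    exact ⟨⟨t, h2.1⟩, h2.2⟩
  · rintro ⟨⟨t, ht⟩, rfl⟩
    exact ⟨t, by rw [← List.append_assoc, ht]⟩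

lemma stepGood (s : List Char) (c : PySem.Set Int) (ch : Char) (p : List Char)
    (hc : ∀ k, k ∈ c ↔ GoodP s p k) :
    ∀ k, k ∈ pv_bstep s (s.length : Int) c ch ↔ GoodP s (p ++ [ch]) k := by
  intro k
  rw [pv_bstep, PySem.Set.mem_union, PySem.Set.mem_ofList, PySem.Set.mem_ofList]
  simp only [List.mem_map, List.mem_filter, List.mem_singleton, Bool.and_eq_true, decide_eq_true_eq,
    beq_iff_eq]
  constructor
  · rintro (⟨k0, ⟨hk0c, hk0m, hget⟩, rfl⟩ | rfl)
    · rcases (hc k0).1 hk0c with ⟨j, rfl, hjm, hsuf⟩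
      have hjlt : j < s.length := by exact_mod_cast hk0m
      refine ⟨j+1, by push_cast; ring, by omega, ?_⟩
      rw [List.take_succ_eq_append_getElem hjlt, suffix_concat_iff]
      refine ⟨hsuf, ?_⟩
      have : PySem.List.pyGet? s ((j:Nat):Int) = s[j]? := by simp [pysem]
      rw [this, List.getElem?_eq_getElem hjlt] at hget
      exact (Option.some_injective _ hget)
    · exact ⟨0, by simp, by simp, by simp⟩
  · rintro ⟨j, rfl, hjm, hsuf⟩
    cases j with
    | zero => right; rfl
    | succ i =>
      left
      have hilt : i < s.length := by omega
      rw [List.take_succ_eq_append_getElem hilt, suffix_concat_iff] at hsuf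
      refine ⟨(i:Int), ⟨(hc _).2 ⟨i, rfl, by omega, hsuf.1⟩, by exact_mod_cast hilt, ?_⟩, by push_cast; ring⟩
      have hi : PySem.List.pyGet? s ((i:Nat):Int) = s[i]? := by simp [pysem]
      rw [hi, List.getElem?_eq_getElem hilt, hsuf.2]

lemma foldl_good (s : List Char) :
    ∀ (l p : List Char) (c : PySem.Set Int),
      (∀ k, k ∈ c ↔ GoodP s p k) →
      ∀ k, k ∈ l.foldl (pv_bstep s (s.length : Int)) c ↔ GoodP s (p ++ l) k := by
  intro l
  induction l with
  | nil => intro p c hc k; simpa using hc k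
  | cons ch l ih =>
    intro p c hc k
    rw [List.foldl_cons]
    have := ih (p ++ [ch]) (pv_bstep s (s.length : Int) c ch) (stepGood s c ch p hc) k
    rwa [List.append_assoc] at this
    
lemma good_nil (s : List Char) (k : Int) :
    k ∈ (PySem.Set.ofList [0] : PySem.Set Int) ↔ GoodP s [] k := by
  rw [PySem.Set.mem_ofList]
  simp only [List.mem_singleton]
  constructor
  · rintro rfl; exact ⟨0, rfl, by simp, by simp⟩
  · rintro ⟨j, rfl, hjm, hsuf⟩
    rw [List.suffix_nil, List.take_eq_nil_iff] at hsuf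
    rcases hsuf with h | h
    · simp [h]
    · subst h; simp at hjm; simp [hjm]

-- suffixes of length ≤ |f| - d transfer between f and f.drop d
lemma suffix_drop_iff (f u : List Char) (d : Nat) (hu : u.length ≤ f.length - d) :
    u <:+ f ↔ u <:+ f.drop d := by
  constructor
  · intro h
    rcases Nat.eq_zero_or_pos u.length with h0 | h0
    · rw [List.length_eq_zero_iff] at h0; subst h0; exact List.nil_suffix
    · rw [List.suffix_iff_eq_drop] at h ⊢
      rw [List.length_drop, List.drop_drop,
        show d + (f.length - d - u.length) = f.length - u.length by omega]
      exact h
  · exact fun h => h.trans (List.drop_suffix d f)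

lemma maxD_cands_eq (f s : List Char) :
    PySem.List.maxD
      ((f.drop (f.length - s.length)).foldl (pv_bstep s (s.length:Int)) (PySem.Set.ofList [0]))
      (fun k => k) 0
    = ((bestFn f s s.length : Nat) : Int) := by
  set m := s.length with hm
  set n := f.length with hn
  have hmem := foldl_good s (f.drop (n - m)) [] (PySem.Set.ofList [0]) (good_nil s)
  simp only [List.nil_append] at hmem
  set cands := (f.drop (n - m)).foldl (pv_bstep s (m:Int)) (PySem.Set.ofList [0]) with hc
  set B := bestFn f s m with hB
  have hgood : ∀ k, k ∈ cands ↔ ∃ j : Nat, k = (j:Int) ∧ j ≤ m ∧ s.take j <:+ f := by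
    intro k
    rw [hmem k]
    unfold GoodP
    constructor
    · rintro ⟨j, rfl, hjm, hsuf⟩
      exact ⟨j, rfl, hjm, hsuf.trans (List.drop_suffix _ f)⟩
    · rintro ⟨j, rfl, hjm, hsuf⟩
      have hjlen : (s.take j).length = j := by rw [List.length_take]; omega
      have hjn : j ≤ n := by have := hsuf.length_le; omega
      exact ⟨j, rfl, hjm, (suffix_drop_iff f (s.take j) (n - m) (by omega)).1 hsuf⟩
  have hBmem : ((B:Nat):Int) ∈ cands :=
    (hgood _).2 ⟨B, rfl, bestFn_le f s m, bestFn_suffix f s m⟩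
  have hne : cands ≠ [] := fun h => by simp [h] at hBmem
  have hmax1 := PySem.List.maxD_mem cands (fun k => k) 0 hne
  have hmax2 := PySem.List.le_maxD_id cands 0 _ hBmem
  rcases (hgood _).1 hmax1 with ⟨j, hj, hjm, hsuf⟩
  have hjB : j ≤ B := bestFn_max f s m j hjm hsuf
  rw [hj] at hmax2 ⊢
  omega

lemma overlapB_eq_best (first second : String) :
    pv_overlapB first second = ((bestFn first.toList second.toList second.toList.length : Nat) : Int) := by
  unfold pv_overlapB
  simp only [PySem.Str.len_eq]
  have hmax : max 0 ((first.toList.length:Int) - (second.toList.length:Int))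
      = ((first.toList.length - second.toList.length : Nat) : Int) := by omega
  rw [hmax]
  have htail : PySem.List.slice first.toList
      (some ((first.toList.length - second.toList.length : Nat) : Int)) none
      = first.toList.drop (first.toList.length - second.toList.length) := by simp [pysem]
  rw [htail]
  exact maxD_cands_eq first.toList second.toList

lemma overlap_eq (first second : String) : get_overlap first second = pv_overlapB first second := by
  rw [get_overlap_eq_best, overlapB_eq_best]

lemma foldl_smash_eq (rest : List String) : ∀ (c : String),
    rest.foldl (fun cystr cypher =>
      String.ofList (cystr.toList ++ (PySem.Str.slice cypher (some (get_overlap cystr cypher)) none).toList)) c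
    = rest.foldl (fun cystr cypher =>
      String.ofList (cystr.toList ++ (PySem.Str.slice cypher (some (pv_overlapB cystr cypher)) none).toList)) c := by
  induction rest with
  | nil => intro c; simp only [List.foldl_nil]
  | cons x xs ih =>
    intro c
    simp only [List.foldl_cons]
    rw [overlap_eq, ih]

-- ===== VERDICT (by name: the statement is the Claim_ definition above) =====
theorem smash_cyphers_spec : Claim_equal_smash_cyphers := by
  intro cylist _
  unfold Spec_smash_cyphers smash_cyphers smash_cyphers_alt
  cases cylist with
  | nil => rfl
  | cons c rest => exact foldl_smash_eq rest c
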